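-- pv_equiv track=rewrite | github.com/key-moon/golf | base_arcdsl/task066.py | val_func_connect
-- ===== SOURCE A (Python) =====
-- def val_func_connect(a, b):
--     ai, aj = a
--     bi, bj = b
--     si = min(ai, bi)
--     ei = max(ai, bi) + 1
--     sj = min(aj, bj)
--     ej = max(aj, bj) + 1
--     if ai == bi:
--         return frozenset((ai, j) for j in range(sj, ej))
--     elif aj == bj:
--         return frozenset((i, aj) for i in range(si, ei))
--     elif bi - ai == bj - aj:
--         return frozenset((i, j) for i, j in zip(range(si, ei), range(sj, ej)))
--     elif bi - ai == aj - bj: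
--         return frozenset((i, j) for i, j in zip(range(si, ei), range(ej - 1, sj - 1, -1)))
--     return frozenset()
-- ===== SOURCE B (Python) =====
-- def val_func_connect(a, b):
--     ai, aj = a
--     bi, bj = b
--     if not (ai == bi or aj == bj or abs(bi - ai) == abs(bj - aj)):
--         return frozenset()
--     if (bi, bj) < (ai, aj):
--         ai, aj, bi, bj = bi, bj, ai, aj
--     di = (bi > ai) - (bi < ai)
--     dj = (bj > aj) - (bj < aj)
--     steps = max(abs(bi - ai), abs(bj - aj))
--     return frozenset((ai + k * di, aj + k * dj) for k in range(steps + 1))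
-- ===== Notes on version B (the rewrite author's own statement) =====
-- stated objective: simpler
-- what changed: Replaces A's four orientation-specific range/zip branches with a single alignment test and one parametric walk (ai+k*di, aj+k*dj) from the lexicographically smaller endpoint.
import Mathlib
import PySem

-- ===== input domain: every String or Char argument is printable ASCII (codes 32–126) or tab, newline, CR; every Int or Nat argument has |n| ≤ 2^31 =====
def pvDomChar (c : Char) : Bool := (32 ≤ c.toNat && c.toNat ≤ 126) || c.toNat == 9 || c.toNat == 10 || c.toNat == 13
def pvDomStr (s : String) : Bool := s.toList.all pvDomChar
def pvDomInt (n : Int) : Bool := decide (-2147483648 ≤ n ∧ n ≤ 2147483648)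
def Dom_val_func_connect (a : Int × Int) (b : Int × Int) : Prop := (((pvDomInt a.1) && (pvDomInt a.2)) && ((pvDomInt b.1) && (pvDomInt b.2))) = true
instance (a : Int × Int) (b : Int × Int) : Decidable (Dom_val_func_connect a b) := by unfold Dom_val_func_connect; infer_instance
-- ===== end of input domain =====

-- B replaces A's four orientation-specific range/zip branches by one alignment test and a single
-- parametric walk from the lexicographically smaller endpoint (objective: simpler).

-- ===== PORT A =====
def val_func_connect (a : Int × Int) (b : Int × Int) : List (Int × Int) :=
  let ai := a.1; let aj := a.2
  let bi := b.1; let bj := b.2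
  let si := min ai bi
  let ei := max ai bi + 1
  let sj := min aj bj
  let ej := max aj bj + 1
  if ai = bi then
    PySem.Set.ofList ((PySem.List.pyRange sj ej 1).map (fun j => (ai, j)))
  else if aj = bj then
    PySem.Set.ofList ((PySem.List.pyRange si ei 1).map (fun i => (i, aj)))
  else if bi - ai = bj - aj then
    PySem.Set.ofList ((PySem.List.pyRange si ei 1).zip (PySem.List.pyRange sj ej 1))
  else if bi - ai = aj - bj then
    PySem.Set.ofList ((PySem.List.pyRange si ei 1).zip (PySem.List.pyRange (ej - 1) (sj - 1) (-1)))
  else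
    PySem.Set.ofList ([] : List (Int × Int))

-- ===== PORT B =====
def val_func_connect_alt (a : Int × Int) (b : Int × Int) : List (Int × Int) :=
  if ¬ (a.1 = b.1 ∨ a.2 = b.2 ∨ |b.1 - a.1| = |b.2 - a.2|) then
    PySem.Set.ofList ([] : List (Int × Int))
  else
    -- the in-place swap 'ai, aj, bi, bj = bi, bj, ai, aj' under '(bi, bj) < (ai, aj)' (tuple lex order)
    let s := if b.1 < a.1 ∨ (b.1 = a.1 ∧ b.2 < a.2) then (b, a) else (a, b)
    let ai := s.1.1; let aj := s.1.2
    let bi := s.2.1; let bj := s.2.2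
    let di : Int := (if ai < bi then 1 else 0) - (if bi < ai then 1 else 0)
    let dj : Int := (if aj < bj then 1 else 0) - (if bj < aj then 1 else 0)
    let steps : Int := max |bi - ai| |bj - aj|
    PySem.Set.ofList ((PySem.List.pyRange 0 (steps + 1) 1).map (fun k => (ai + k * di, aj + k * dj)))

-- ===== PRECONDITION & SPEC =====
def Spec_val_func_connect (a : Int × Int) (b : Int × Int) (out : List (Int × Int)) : Prop := out = val_func_connect_alt a b
instance (a : Int × Int) (b : Int × Int) (out : List (Int × Int)) : Decidable (Spec_val_func_connect a b out) := by unfold Spec_val_func_connect; infer_instance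

-- ===== CLAIM (what is proved, stated in full; the proofs are below) =====
def Claim_equal_val_func_connect : Prop := ∀ (a : Int × Int) (b : Int × Int), Dom_val_func_connect a b → Spec_val_func_connect a b (val_func_connect a b)

-- ===== LEMMAS AND PROOFS =====

lemma map_range_congr (n m : Nat) (f g : Nat → Int × Int) (hn : n = m)
    (h : ∀ k, k < n → f k = g k) : (List.range n).map f = (List.range m).map g := by
  subst hn
  exact List.map_congr_left (fun k hk => h k (List.mem_range.mp hk))

lemma zip_map_range (n m : Nat) (f g : Nat → Int) (hm : m = n) :
    ((List.range n).map f).zip ((List.range m).map g) = (List.range n).map (fun k => (f k, g k)) := by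
  subst hm; exact List.zip_map'

theorem val_func_connect_spec : Claim_equal_val_func_connect := by
  rintro ⟨ai, aj⟩ ⟨bi, bj⟩ _
  show val_func_connect (ai, aj) (bi, bj) = val_func_connect_alt (ai, aj) (bi, bj)
  unfold val_func_connect val_func_connect_alt
  dsimp only
  split_ifs <;> simp only [Int.abs_eq_natAbs] at * <;> try omega
  all_goals refine congrArg PySem.Set.ofList ?_
  all_goals simp only [PySem.List.pyRange_one, PySem.List.pyRange_neg_one, List.map_map]
  all_goals try rw [zip_map_range _ _ _ _ (by omega)]
  all_goals refine map_range_congr _ _ _ _ (by omega) (fun k hk => ?_)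
  all_goals simp only [Function.comp_apply, Prod.mk.injEq]
  all_goals constructor <;> omega
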